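-- pv_equiv track=rewrite | github.com/IvanRenison/ProgrammingProblems | 2022-2023 ICPC Brazil Subregional Programming Contest/N.py | solve
-- ===== SOURCE A (Python) =====
-- from heapq import nlargest
-- from typing import List, Tuple
--
-- def solve(As: List[int], Bs: List[int], K: int, L: int) -> int:
--     N: int = len(As)
--     highest_score_possible: int = 0
--
--     for i in range(K+1):
--         # Peak the 0..i-1 and K-i..K-1 cards
--
--         score: int = 0
--         for j in range(i):
--             score += As[j]
--         for j in range(N-(K-i), N):
--             score += As[j]
--
--         peaked_Bs: List[int] = Bs[:i] + Bs[N-(K-i):]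
--
--         # Get L highest cards from peaked_Bs
--         highest: List[int] = nlargest(L, peaked_Bs)
--
--         for x in highest:
--             score += x
--
--         highest_score_possible = max(highest_score_possible, score)
--
--     return highest_score_possible
-- ===== SOURCE B (Python) =====
-- from typing import List
--
-- def _insert(pool: List[int], x: int) -> None:
--     # insert x into ascending pool, before the first element >= x
--     idx = len(pool)
--     for j in range(len(pool)):
--         if pool[j] >= x:
--             idx = j
--             break
--     pool.insert(idx, x)
--
-- def solve(As: List[int], Bs: List[int], K: int, L: int) -> int:
--     # Incremental sliding-window version: instead of rebuilding and re-selecting the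
--     # candidate pool from scratch for every split i, maintain one ascending sorted
--     # multiset of the peekable Bs across the window shift (one insertion + one removal
--     # per step), together with running prefix/suffix sums of As.
--     N = len(As)
--     left = 0
--     right = sum(As[N - K:])
--     pool = sorted(Bs[N - K:])
--     best = 0
--     for i in range(K + 1):
--         if i > 0:
--             left += As[i - 1]
--             right -= As[N - K + i - 1]
--             if i - 1 < len(Bs):
--                 _insert(pool, Bs[i - 1])
--             j = N - K + i - 1
--             if j < len(Bs):
--                 pool.remove(Bs[j])
--         cand = left + right + sum(pool[max(len(pool) - L, 0):])
--         if cand > best: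
--             best = cand
--     return best
-- ===== Notes on version B (the rewrite author's own statement) =====
-- stated objective: faster
-- what changed: B maintains one ascending sorted multiset of the peekable B-cards incrementally across the window shift (one ordered insertion and one removal per split) together with running prefix/suffix sums of As, instead of A's per-split rebuild of the pool by slicing plus heapq.nlargest and recomputing both A-sums with nested index loops.
import Mathlib
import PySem

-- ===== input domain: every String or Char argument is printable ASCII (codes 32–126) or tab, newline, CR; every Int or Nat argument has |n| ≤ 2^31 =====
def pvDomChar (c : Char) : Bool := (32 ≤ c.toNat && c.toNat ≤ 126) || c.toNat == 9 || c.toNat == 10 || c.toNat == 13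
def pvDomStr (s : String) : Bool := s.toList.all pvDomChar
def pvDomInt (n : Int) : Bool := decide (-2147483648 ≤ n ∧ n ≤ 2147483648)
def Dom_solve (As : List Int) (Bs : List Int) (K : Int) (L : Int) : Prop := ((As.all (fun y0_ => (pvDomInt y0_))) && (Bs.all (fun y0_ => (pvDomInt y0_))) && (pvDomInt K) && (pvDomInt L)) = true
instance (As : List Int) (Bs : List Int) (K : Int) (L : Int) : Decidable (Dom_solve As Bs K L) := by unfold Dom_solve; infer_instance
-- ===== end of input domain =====

-- B replaces A's per-split rebuild+reselect (slice, nlargest, index loops) by one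
-- incrementally maintained ascending sorted multiset of the peekable Bs (one ordered
-- insertion and one removal per window shift) plus running prefix/suffix sums of As
-- (objective: faster; same returned value on Pre_solve).

-- ===== PORT A =====
-- heapq.nlargest(n, xs) = the n largest elements, descending (= sorted(xs, reverse=True)[:n]; [] for n ≤ 0)
def pyNLargest (n : Int) (xs : List Int) : List Int :=
  (PySem.List.sorted xs (fun x => x) true).take (max n 0).toNat

def stepA (As : List Int) (Bs : List Int) (K : Int) (L : Int) (best : Int) (i : Int) : Int :=
  let N : Int := As.length
  let score : Int := (PySem.List.pyRange 0 i 1).foldl (fun s j => s + PySem.List.pyGetD As j 0) 0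
  let score := (PySem.List.pyRange (N - (K - i)) N 1).foldl (fun s j => s + PySem.List.pyGetD As j 0) score
  let peaked := PySem.List.slice Bs none (some i) ++ PySem.List.slice Bs (some (N - (K - i))) none
  let highest := pyNLargest L peaked
  let score := highest.foldl (fun s x => s + x) score
  max best score

def solve (As : List Int) (Bs : List Int) (K : Int) (L : Int) : Int :=
  (PySem.List.pyRange 0 (K + 1) 1).foldl (stepA As Bs K L) 0

-- ===== PORT B =====
-- _insert: scan for the first element ≥ x and insert there (structural form of Source B's index loop)
def insertAsc (x : Int) : List Int → List Int
  | [] => [x]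
  | y :: ys => if y ≥ x then x :: y :: ys else y :: insertAsc x ys

-- state: (left, right, pool, best); pool.remove(v) always succeeds under Pre_solve,
-- the .getD fallback only makes the port total
def stepB (As : List Int) (Bs : List Int) (K : Int) (L : Int)
    (st : Int × Int × List Int × Int) (i : Int) : Int × Int × List Int × Int :=
  let N : Int := As.length
  let M : Int := Bs.length
  let left := if 0 < i then st.1 + PySem.List.pyGetD As (i - 1) 0 else st.1
  let right := if 0 < i then st.2.1 - PySem.List.pyGetD As (N - K + i - 1) 0 else st.2.1
  let pool := if 0 < i ∧ i - 1 < M then insertAsc (PySem.List.pyGetD Bs (i - 1) 0) st.2.2.1 else st.2.2.1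
  let pool := if 0 < i ∧ N - K + i - 1 < M then
      (PySem.List.remove? pool (PySem.List.pyGetD Bs (N - K + i - 1) 0)).getD pool
    else pool
  let cand := left + right + (PySem.List.slice pool (some (max ((pool.length : Int) - L) 0)) none).sum
  (left, right, pool, if st.2.2.2 < cand then cand else st.2.2.2)

def solve_alt (As : List Int) (Bs : List Int) (K : Int) (L : Int) : Int :=
  let N : Int := As.length
  ((PySem.List.pyRange 0 (K + 1) 1).foldl (stepB As Bs K L)
    (0, (PySem.List.slice As (some (N - K)) none).sum,
     PySem.List.sorted (PySem.List.slice Bs (some (N - K)) none) (fun x => x) false, 0)).2.2.2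

-- ===== PRECONDITION & SPEC =====
-- Pre_ excludes exactly K > len(As), on which A raises IndexError: the loop always
-- reaches i = len(As)+1 ≤ K (if not an earlier i), whose prefix loop indexes As[len(As)].
def Pre_solve (As : List Int) (Bs : List Int) (K : Int) (L : Int) : Prop :=
  K ≤ (As.length : Int)
instance (As : List Int) (Bs : List Int) (K : Int) (L : Int) : Decidable (Pre_solve As Bs K L) := by unfold Pre_solve; infer_instance

def pvWitness_solve : List Int × List Int × Int × Int := ([1, 2], [3, 4], 1, 1)

def Spec_solve (As : List Int) (Bs : List Int) (K : Int) (L : Int) (out : Int) : Prop := out = solve_alt As Bs K L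
instance (As : List Int) (Bs : List Int) (K : Int) (L : Int) (out : Int) : Decidable (Spec_solve As Bs K L out) := by unfold Spec_solve; infer_instance

-- ===== CLAIM (what is proved, stated in full; the proofs are below) =====
def Claim_equal_solve : Prop := ∀ (As : List Int) (Bs : List Int) (K : Int) (L : Int), Dom_solve As Bs K L → Pre_solve As Bs K L → Spec_solve As Bs K L (solve As Bs K L)

-- ===== LEMMAS AND PROOFS =====

-- the pool of peekable B-cards at split i, in the order A builds it
def peaked (Bs : List Int) (N K i : Int) : List Int :=
  PySem.List.slice Bs none (some i) ++ PySem.List.slice Bs (some (N - K + i)) none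

-- the candidate score of peaking i cards from the front and K-i from the back, in closed form
def candX (As : List Int) (Bs : List Int) (K : Int) (L : Int) (i : Int) : Int :=
  (As.take i.toNat).sum + (As.drop ((As.length : Int) - K + i).toNat).sum +
  ((PySem.List.sorted (peaked Bs (As.length : Int) K i) (fun x => x) true).take L.toNat).sum

theorem range_map_getD (xs : List Int) : ∀ (m : Nat), m ≤ xs.length →
    (List.range m).map (fun k => xs.getD k 0) = xs.take m := by
  intro m hm
  induction m with
  | zero => simp
  | succ n ih =>
    rw [List.range_succ, List.map_append, ih (by omega), List.take_add_one]
    simp [List.getD_eq_getElem?_getD, List.getElem?_eq_getElem (by omega : n < xs.length)]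

theorem stepA_eq (As Bs : List Int) (K L : Int) (hK : K ≤ (As.length : Int))
    (best i : Int) (hi : 0 ≤ i) (hiK : i ≤ K) :
    stepA As Bs K L best i = max best (candX As Bs K L i) := by
  have e1 : (As.length : Int) - (K - i) = (As.length : Int) - K + i := by ring
  have ha : (0:Int) ≤ (As.length : Int) - K + i := by omega
  have hmL : (max L 0).toNat = L.toNat := by omega
  unfold stepA candX pyNLargest peaked
  simp only [e1, hmL]
  rw [PySem.List.foldl_add (g := fun j => PySem.List.pyGetD As j 0),
      PySem.List.map_pyGetD_pyRange' (ha := ha),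
      PySem.List.foldl_add (g := fun (x : Int) => x),
      PySem.List.foldl_add (g := fun j => PySem.List.pyGetD As j 0),
      PySem.List.pyRange_one]
  simp only [Int.sub_zero, List.map_map, Function.comp_def, zero_add]
  simp only [PySem.List.pyGetD_natCast]
  rw [range_map_getD As i.toNat (by omega)]
  simp [List.map_id']

theorem insertAsc_perm (x : Int) (l : List Int) : (insertAsc x l).Perm (x :: l) := by
  induction l with
  | nil => simp [insertAsc]
  | cons y ys ih =>
    simp only [insertAsc]
    split_ifs
    · exact List.Perm.refl _
    · exact ((ih.cons y).trans (List.Perm.swap x y ys))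

theorem insertAsc_pairwise (x : Int) (l : List Int) (h : l.Pairwise (· ≤ ·)) :
    (insertAsc x l).Pairwise (· ≤ ·) := by
  induction l with
  | nil => simp [insertAsc]
  | cons y ys ih =>
    simp only [insertAsc]
    rcases List.pairwise_cons.1 h with ⟨hy, hys⟩
    split_ifs with hxy
    · refine List.pairwise_cons.2 ⟨?_, h⟩
      intro b hb
      rcases List.mem_cons.mp hb with hb | hb
      · omega
      · exact le_trans (by omega) (hy b hb)
    · refine List.pairwise_cons.2 ⟨?_, ih hys⟩
      intro b hb
      rcases List.mem_cons.mp ((insertAsc_perm x ys).mem_iff.mp hb) with hb | hb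
      · subst hb; omega
      · exact hy b hb

-- erase on a perm: l ~ v :: m → l.erase v ~ m
theorem erase_perm_of_perm_cons (l m : List Int) (v : Int) (h : l.Perm (v :: m)) :
    (l.erase v).Perm m := by
  have hv : v ∈ l := h.mem_iff.mpr (by simp)
  have h2 : l.Perm (v :: l.erase v) := List.perm_cons_erase hv
  exact (List.Perm.cons_inv ((h2.symm).trans h))

-- one window shift of B's pool keeps it the ascending sort of the peeked multiset
theorem pool_step (Bs : List Int) (N K i : Int) (hN : 0 ≤ N) (hK : K ≤ N)
    (h1 : 1 ≤ i) (hiK : i ≤ K) :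
    (if 0 < i ∧ N - K + i - 1 < (Bs.length : Int) then
      (PySem.List.remove?
          (if 0 < i ∧ i - 1 < (Bs.length : Int) then
            insertAsc (PySem.List.pyGetD Bs (i - 1) 0)
              (PySem.List.sorted (peaked Bs N K (i - 1)) (fun x => x) false)
          else PySem.List.sorted (peaked Bs N K (i - 1)) (fun x => x) false)
          (PySem.List.pyGetD Bs (N - K + i - 1) 0)).getD
        (if 0 < i ∧ i - 1 < (Bs.length : Int) then
          insertAsc (PySem.List.pyGetD Bs (i - 1) 0)
            (PySem.List.sorted (peaked Bs N K (i - 1)) (fun x => x) false)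
        else PySem.List.sorted (peaked Bs N K (i - 1)) (fun x => x) false)
    else
      (if 0 < i ∧ i - 1 < (Bs.length : Int) then
        insertAsc (PySem.List.pyGetD Bs (i - 1) 0)
          (PySem.List.sorted (peaked Bs N K (i - 1)) (fun x => x) false)
      else PySem.List.sorted (peaked Bs N K (i - 1)) (fun x => x) false))
    = PySem.List.sorted (peaked Bs N K i) (fun x => x) false := by
  have hpe1 : peaked Bs N K (i - 1) = Bs.take (i-1).toNat ++ Bs.drop (N-K+i-1).toNat := by
    unfold peaked
    rw [PySem.List.slice_to _ (by omega), PySem.List.slice_from _ (by omega : (0:Int) ≤ N - K + (i-1))]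
    rw [show N - K + (i - 1) = N - K + i - 1 by ring]
  have hpe2 : peaked Bs N K i = Bs.take i.toNat ++ Bs.drop (N-K+i).toNat := by
    unfold peaked
    rw [PySem.List.slice_to _ (by omega), PySem.List.slice_from _ (by omega : (0:Int) ≤ N - K + i)]
  have hSperm : (PySem.List.sorted (peaked Bs N K (i - 1)) (fun x => x) false).Perm
      (Bs.take (i-1).toNat ++ Bs.drop (N-K+i-1).toNat) := by
    rw [← hpe1]; exact PySem.List.sorted_perm _ _ _
  have hSpw : (PySem.List.sorted (peaked Bs N K (i - 1)) (fun x => x) false).Pairwise (· ≤ ·) :=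
    PySem.List.sorted_pairwise _ _
  by_cases hrem : N - K + i - 1 < (Bs.length : Int)
  · have hin : i - 1 < (Bs.length : Int) := by omega
    rw [if_pos ⟨by omega, hrem⟩, if_pos ⟨by omega, hin⟩]
    have hlt : (i-1).toNat < Bs.length := by omega
    have hvin : PySem.List.pyGetD Bs (i - 1) 0 = Bs[(i-1).toNat] :=
      PySem.List.pyGetD_eq_getElem Bs 0 (by omega) (by omega)
    have htake : Bs.take i.toNat = Bs.take (i-1).toNat ++ [Bs[(i-1).toNat]] := by
      rw [show i.toNat = (i-1).toNat + 1 by omega, List.take_add_one,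
          List.getElem?_eq_getElem hlt]
      rfl
    have hperm1 : (insertAsc (PySem.List.pyGetD Bs (i - 1) 0)
        (PySem.List.sorted (peaked Bs N K (i - 1)) (fun x => x) false)).Perm
        (Bs[(i-1).toNat] :: (Bs.take (i-1).toNat ++ Bs.drop (N-K+i-1).toNat)) := by
      rw [hvin]
      exact (insertAsc_perm _ _).trans (hSperm.cons _)
    have hpw1 : (insertAsc (PySem.List.pyGetD Bs (i - 1) 0)
        (PySem.List.sorted (peaked Bs N K (i - 1)) (fun x => x) false)).Pairwise (· ≤ ·) :=
      insertAsc_pairwise _ _ hSpw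
    have hjlt : (N-K+i-1).toNat < Bs.length := by omega
    have hvout : PySem.List.pyGetD Bs (N - K + i - 1) 0 = Bs[(N-K+i-1).toNat] :=
      PySem.List.pyGetD_eq_getElem Bs 0 (by omega) (by omega)
    have hdropj : Bs.drop (N-K+i-1).toNat = Bs[(N-K+i-1).toNat] :: Bs.drop ((N-K+i-1).toNat + 1) :=
      List.drop_eq_getElem_cons hjlt
    have hj1 : (N-K+i).toNat = (N-K+i-1).toNat + 1 := by omega
    have hperm2 : (insertAsc (PySem.List.pyGetD Bs (i - 1) 0)
        (PySem.List.sorted (peaked Bs N K (i - 1)) (fun x => x) false)).Perm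
        (Bs[(N-K+i-1).toNat] :: peaked Bs N K i) := by
      rw [hpe2, htake, hj1]
      refine hperm1.trans ?_
      rw [hdropj, List.append_assoc, List.singleton_append]
      exact (List.Perm.cons _ List.perm_middle).trans
        ((List.Perm.swap _ _ _).trans (List.perm_middle.symm.cons _))
    have hmem : Bs[(N-K+i-1).toNat] ∈ insertAsc (PySem.List.pyGetD Bs (i - 1) 0)
        (PySem.List.sorted (peaked Bs N K (i - 1)) (fun x => x) false) :=
      hperm2.mem_iff.mpr (by simp)
    rw [hvout, PySem.List.remove?_eq_some_erase _ _ hmem, Option.getD_some]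
    refine (PySem.List.sorted_id_eq_of_perm_of_pairwise _ _ ?_ ?_).symm
    · exact erase_perm_of_perm_cons _ _ _ hperm2
    · exact List.Pairwise.sublist (List.erase_sublist) hpw1
  · rw [if_neg (by omega : ¬ (0 < i ∧ N - K + i - 1 < (Bs.length : Int)))]
    by_cases hin : i - 1 < (Bs.length : Int)
    · rw [if_pos ⟨by omega, hin⟩]
      have hlt : (i-1).toNat < Bs.length := by omega
      have hvin : PySem.List.pyGetD Bs (i - 1) 0 = Bs[(i-1).toNat] :=
        PySem.List.pyGetD_eq_getElem Bs 0 (by omega) (by omega)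
      have htake : Bs.take i.toNat = Bs.take (i-1).toNat ++ [Bs[(i-1).toNat]] := by
        rw [show i.toNat = (i-1).toNat + 1 by omega, List.take_add_one,
            List.getElem?_eq_getElem hlt]
        rfl
      refine (PySem.List.sorted_id_eq_of_perm_of_pairwise _ _ ?_ (insertAsc_pairwise _ _ hSpw)).symm
      have hd1 : Bs.drop (N-K+i-1).toNat = [] := List.drop_of_length_le (by omega)
      have hd2 : Bs.drop (N-K+i).toNat = [] := List.drop_of_length_le (by omega)
      rw [hvin, hpe2, htake, hd2, List.append_nil]
      refine (insertAsc_perm _ _).trans ?_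
      refine ((hSperm.cons _).trans ?_)
      rw [hd1, List.append_nil]
      exact (List.perm_append_singleton _ _).symm
    · rw [if_neg (by omega : ¬ (0 < i ∧ i - 1 < (Bs.length : Int)))]
      have hpe : peaked Bs N K (i - 1) = peaked Bs N K i := by
        rw [hpe1, hpe2, List.take_of_length_le (by omega), List.take_of_length_le (by omega),
            List.drop_of_length_le (by omega), List.drop_of_length_le (by omega)]
      rw [hpe]

-- sum of the top-L of the pool: descending take L = ascending drop (len-L)
theorem topL_sum (xs : List Int) (L : Int) :
    (PySem.List.slice (PySem.List.sorted xs (fun x => x) false)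
        (some (max (((PySem.List.sorted xs (fun x => x) false).length : Int) - L) 0)) none).sum
    = ((PySem.List.sorted xs (fun x => x) true).take L.toNat).sum := by
  have hdesc : PySem.List.sorted xs (fun x => x) true
      = (PySem.List.sorted xs (fun x => x) false).reverse := by
    refine List.eq_of_perm_of_sorted (le := (· ≥ ·))
      (fun a b _ _ h1 h2 => le_antisymm h2 h1) ?_ ?_ ?_
    · exact PySem.List.sorted_pairwise_rev xs (fun x => x)
    · exact List.pairwise_reverse.mpr (PySem.List.sorted_pairwise xs (fun x => x))
    · exact (PySem.List.sorted_perm _ _ _).trans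
        ((PySem.List.sorted_perm xs (fun x => x) false).symm.trans (List.reverse_perm _).symm)
  rw [hdesc, List.take_reverse, List.sum_reverse,
      PySem.List.slice_from _ (le_max_right _ _)]
  by_cases hL : 0 ≤ L
  · rw [show (max (((PySem.List.sorted xs (fun x => x) false).length : Int) - L) 0).toNat
        = (PySem.List.sorted xs (fun x => x) false).length - L.toNat by omega]
  · rw [List.drop_of_length_le (l := PySem.List.sorted xs (fun x => x) false) (by omega),
        List.drop_of_length_le (by omega)]

-- the candidate line of B's step equals the closed-form candidate
theorem cand_eq (As Bs : List Int) (K L : Int) (t : Nat) :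
    (As.take t).sum + (As.drop ((As.length : Int) - K + (t : Int)).toNat).sum +
      (PySem.List.slice (PySem.List.sorted (peaked Bs (As.length : Int) K (t : Int)) (fun x => x) false)
        (some (max (((PySem.List.sorted (peaked Bs (As.length : Int) K (t : Int)) (fun x => x) false).length : Int) - L) 0)) none).sum
    = candX As Bs K L (t : Int) := by
  rw [topL_sum]
  unfold candX
  rw [Int.toNat_natCast]

theorem B_inv (As Bs : List Int) (K L : Int) (hK : K ≤ (As.length : Int)) :
    ∀ n : Nat, (n : Int) ≤ K + 1 →
    (PySem.List.pyRange 0 (n : Int) 1).foldl (stepB As Bs K L)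
      (0, (PySem.List.slice As (some ((As.length : Int) - K)) none).sum,
       PySem.List.sorted (PySem.List.slice Bs (some ((As.length : Int) - K)) none) (fun x => x) false, 0) =
    ((As.take (n - 1)).sum, (As.drop ((As.length : Int) - K + ((n - 1 : Nat) : Int)).toNat).sum,
      PySem.List.sorted (peaked Bs (As.length : Int) K ((n - 1 : Nat) : Int)) (fun x => x) false,
      (PySem.List.pyRange 0 (n : Int) 1).foldl (fun b i => max b (candX As Bs K L i)) 0) := by
  have hpe0 : peaked Bs (As.length : Int) K 0
      = PySem.List.slice Bs (some ((As.length : Int) - K)) none := by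
    unfold peaked
    rw [PySem.List.slice_to _ (by omega)]
    simp
  intro n
  induction n with
  | zero =>
    intro _
    rw [show ((0:Nat):Int) = 0 by simp, PySem.List.pyRange_one_eq_nil (by omega),
        PySem.List.slice_from As (by omega : (0:Int) ≤ (As.length:Int) - K)]
    simp [hpe0]
  | succ n ih =>
    intro h
    have hn : (n : Int) ≤ K + 1 := by push_cast at h ⊢; omega
    have hnK : (n : Int) ≤ K := by push_cast at h; omega
    rw [show ((n+1:Nat):Int) = (n:Int)+1 by push_cast; ring,
        PySem.List.pyRange_one_succ_right (by positivity), List.foldl_append, List.foldl_append,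
        ih hn]
    simp only [List.foldl_cons, List.foldl_nil]
    simp only [stepB]
    by_cases h0 : n = 0
    · subst h0
      have hc := cand_eq As Bs K L 0
      simp only [Nat.cast_zero, hpe0] at hc
      norm_num at hc
      rw [show ((0:Nat):Int) = 0 from rfl, PySem.List.pyRange_one_eq_nil (le_refl (0:Int))]
      norm_num [hpe0, hc]
      split_ifs <;> omega
    · have hn1 : 0 < n := Nat.pos_of_ne_zero h0
      have hKn : (1:Int) ≤ (n:Int) := by exact_mod_cast hn1
      have hlen : n ≤ As.length := by omega
      simp only [Nat.add_sub_cancel, show ((n-1:Nat):Int) = (n:Int) - 1 from by omega]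
      rw [if_pos (by omega : (0:Int) < (n:Int)), if_pos (by omega : (0:Int) < (n:Int))]
      have eleft : (As.take (n-1)).sum + PySem.List.pyGetD As ((n:Int) - 1) 0 = (As.take n).sum := by
        rw [show ((n:Int) - 1) = ((n-1 : Nat) : Int) by omega, PySem.List.pyGetD_natCast,
            List.getD_eq_getElem?_getD, List.getElem?_eq_getElem (by omega : n - 1 < As.length)]
        have key := List.sum_take_succ As (n-1) (by omega)
        simp only [show n-1+1 = n from by omega] at key
        rw [key]
        simp
      have j1 : ((As.length:Int) - K + ((n:Int) - 1)).toNat < As.length := by omega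
      have eright : (As.drop ((As.length:Int) - K + ((n:Int) - 1)).toNat).sum
            - PySem.List.pyGetD As ((As.length:Int) - K + (n:Int) - 1) 0
          = (As.drop ((As.length:Int) - K + (n:Int)).toNat).sum := by
        rw [List.drop_eq_getElem_cons j1,
            PySem.List.pyGetD_eq_getElem As 0 (by omega) (by push_cast; omega)]
        simp only [show ((As.length:Int) - K + (n:Int) - 1).toNat = ((As.length:Int) - K + ((n:Int) - 1)).toNat from by omega]
        simp only [show ((As.length:Int) - K + ((n:Int) - 1)).toNat + 1 = ((As.length:Int) - K + (n:Int)).toNat from by omega]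
        simp only [List.sum_cons]
        ring
      rw [pool_step Bs (As.length : Int) K (n:Int) (by omega) hK (by omega) hnK,
          eleft, eright, cand_eq As Bs K L n]
      simp only [Prod.mk.injEq]
      refine ⟨trivial, trivial, trivial, ?_⟩
      split_ifs <;> omega

-- ===== VERDICT (by name: the statement is the Claim_ definition above) =====
theorem solve_spec : Claim_equal_solve := by
  intro As Bs K L _ hPre
  have hK := hPre
  simp only [Spec_solve, solve, solve_alt]
  by_cases hKneg : K + 1 ≤ 0
  · rw [PySem.List.pyRange_one_eq_nil hKneg]
    simp
  · push_neg at hKneg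
    have hn : (((K+1).toNat : Nat) : Int) = K + 1 := by omega
    conv_rhs => rw [← hn]
    rw [B_inv As Bs K L hK (K+1).toNat (by omega)]
    simp only [hn]
    apply PySem.List.foldl_congr_mem
    intro acc x hx
    have hm := (PySem.List.mem_pyRange_one).1 hx
    exact stepA_eq As Bs K L hK acc x hm.1 (by omega)
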